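-- pv_equiv track=rewrite | github.com/ericbrandon/currently | canada_data/seed_iwls_overrides.py | insert_into_block
-- ===== SOURCE A (Python) =====
-- def insert_into_block(
--     raw: dict, marker_key: str, marker_desc: str, new_entries: dict
-- ) -> dict:
--     """Return a new dict with new_entries placed inside the block whose
--     header is marker_key — i.e. immediately before the next `_block_*`
--     marker, or at end-of-dict if marker_key is in the last block.
--
--     Plain `raw[idx] = value` always appends at end-of-dict, which lands
--     new entries in whichever block happens to be last in the file. Once a
--     second seeder block is added below this one, that's the wrong block.
--     """
--     if marker_key not in raw:
--         out = dict(raw)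
--         out[marker_key] = marker_desc
--         out.update(new_entries)
--         return out
--     out: dict = {}
--     in_block = False
--     inserted = False
--     for k, v in raw.items():
--         if k == marker_key:
--             in_block = True
--             out[k] = marker_desc  # refresh description on each run
--             continue
--         if in_block and k.startswith("_block_"):
--             out.update(new_entries)
--             inserted = True
--             in_block = False
--         out[k] = v
--     if in_block and not inserted:
--         out.update(new_entries)
--     return out
-- ===== SOURCE B (Python) =====
-- def insert_into_block(raw, marker_key, marker_desc, new_entries):
--     items = list(raw.items())
--     keys = [k for k, _ in items]
--     if marker_key not in keys:
--         return dict(items + [(marker_key, marker_desc)] + list(new_entries.items()))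
--     i = keys.index(marker_key)
--     j = next((t for t in range(i + 1, len(items))
--               if keys[t].startswith("_block_")), len(items))
--     return dict(items[:i] + [(marker_key, marker_desc)]
--                 + items[i + 1:j] + list(new_entries.items()) + items[j:])
-- ===== Notes on version B (the rewrite author's own statement) =====
-- stated objective: alternative
-- what changed: Replaces A's single stateful pass with in_block/inserted flags by an index-and-slice construction: find the marker's index i and the next '_block_' index j, then build the result as dict of one concatenation of slices, relying on dict()'s first-position/last-value rule for overwrites.
import Mathlib
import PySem

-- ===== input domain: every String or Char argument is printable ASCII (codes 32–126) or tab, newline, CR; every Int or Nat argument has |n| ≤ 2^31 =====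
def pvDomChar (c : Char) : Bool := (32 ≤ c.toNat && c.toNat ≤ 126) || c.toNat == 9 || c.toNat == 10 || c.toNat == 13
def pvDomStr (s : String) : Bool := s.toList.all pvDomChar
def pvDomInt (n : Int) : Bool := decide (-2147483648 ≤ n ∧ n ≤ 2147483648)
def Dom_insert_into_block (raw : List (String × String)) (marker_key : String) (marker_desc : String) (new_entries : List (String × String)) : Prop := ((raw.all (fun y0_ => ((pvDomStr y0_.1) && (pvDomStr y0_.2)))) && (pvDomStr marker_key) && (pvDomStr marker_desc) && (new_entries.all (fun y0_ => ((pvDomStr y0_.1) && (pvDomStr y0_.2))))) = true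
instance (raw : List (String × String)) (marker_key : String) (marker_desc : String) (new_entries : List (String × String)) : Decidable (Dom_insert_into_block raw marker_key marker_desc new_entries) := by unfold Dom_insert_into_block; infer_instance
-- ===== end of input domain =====

-- B rebuilds the dict by index-and-slice concatenation instead of A's flagged single pass (objective: alternative decomposition, same cost).


-- ===== PORT A =====
-- the test `k.startswith("_block_")` (named so the proofs can treat it atomically)
def pvIsBlock (kv : String × String) : Bool := PySem.Str.startswith kv.1 "_block_"

-- one loop iteration of A's `for k, v in raw.items():` body; state = (out, in_block, inserted)
def pvStepA (marker_key marker_desc : String) (new_entries : List (String × String))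
    (s : PySem.Dict String String × Bool × Bool) (kv : String × String) :
    PySem.Dict String String × Bool × Bool :=
  if kv.1 == marker_key then (s.1.insert kv.1 marker_desc, true, s.2.2)
  else
    let s' := if s.2.1 && pvIsBlock kv
              then (s.1.update new_entries, false, true) else s
    (s'.1.insert kv.1 kv.2, s'.2.1, s'.2.2)

def insert_into_block (raw : List (String × String)) (marker_key : String) (marker_desc : String) (new_entries : List (String × String)) : List (String × String) :=
  if ¬ (marker_key ∈ raw.map Prod.fst) then
    (((PySem.Dict.ofList raw).insert marker_key marker_desc).update new_entries).items
  else
    let fin := raw.foldl (pvStepA marker_key marker_desc new_entries) (PySem.Dict.empty, false, false)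
    if fin.2.1 && !fin.2.2 then (fin.1.update new_entries).items else fin.1.items

-- ===== PORT B =====
-- slices items[:i], items[i+1:j], items[j:] with 0 ≤ i < j ≤ len are take/drop (exact here since the
-- indices come from index/enumeration); the generator `next(... range(i+1,len) ...)` is the findIdx scan over items.drop (i+1)
def insert_into_block_alt (raw : List (String × String)) (marker_key : String) (marker_desc : String) (new_entries : List (String × String)) : List (String × String) :=
  let items := raw
  let keys := items.map Prod.fst
  match PySem.List.index? keys marker_key with
  | none => (PySem.Dict.ofList (items ++ [(marker_key, marker_desc)] ++ new_entries)).items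
  | some i =>
    let j := (i + 1) + (items.drop (i + 1)).findIdx pvIsBlock
    (PySem.Dict.ofList (items.take i ++ [(marker_key, marker_desc)]
        ++ ((items.drop (i + 1)).take (j - (i + 1))) ++ new_entries ++ items.drop j)).items

-- ===== PRECONDITION & SPEC =====
-- Pre_ excludes association lists whose raw keys repeat: such a list does not denote a Python dict
-- (dict(raw) collapses the duplicates before A ever runs), so its behaviour there is not A's to specify.
def Pre_insert_into_block (raw : List (String × String)) (marker_key : String) (marker_desc : String) (new_entries : List (String × String)) : Prop :=
  (raw.map Prod.fst).Nodup
instance (raw : List (String × String)) (marker_key : String) (marker_desc : String) (new_entries : List (String × String)) : Decidable (Pre_insert_into_block raw marker_key marker_desc new_entries) := by unfold Pre_insert_into_block; infer_instance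

def pvWitness_insert_into_block : (List (String × String)) × String × String × (List (String × String)) :=
  ([("m", "old"), ("a", "1"), ("_block_next", "hdr"), ("z", "9")], "m", "desc", [("n1", "v1")])

def Spec_insert_into_block (raw : List (String × String)) (marker_key : String) (marker_desc : String) (new_entries : List (String × String)) (out : List (String × String)) : Prop := out = insert_into_block_alt raw marker_key marker_desc new_entries
instance (raw : List (String × String)) (marker_key : String) (marker_desc : String) (new_entries : List (String × String)) (out : List (String × String)) : Decidable (Spec_insert_into_block raw marker_key marker_desc new_entries out) := by unfold Spec_insert_into_block; infer_instance

-- ===== CLAIM (what is proved, stated in full; the proofs are below) =====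
def Claim_equal_insert_into_block : Prop := ∀ (raw : List (String × String)) (marker_key : String) (marker_desc : String) (new_entries : List (String × String)), Dom_insert_into_block raw marker_key marker_desc new_entries → Pre_insert_into_block raw marker_key marker_desc new_entries → Spec_insert_into_block raw marker_key marker_desc new_entries (insert_into_block raw marker_key marker_desc new_entries)

-- ===== LEMMAS AND PROOFS =====

-- phase lemma: over a segment without the marker key and with in_block = false, A's loop just copies
theorem pvFoldA_copy (marker_key marker_desc : String) (new_entries : List (String × String))
    (l : List (String × String)) (d : PySem.Dict String String) (ins : Bool)
    (h : marker_key ∉ l.map Prod.fst) :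
    l.foldl (pvStepA marker_key marker_desc new_entries) (d, false, ins)
      = (d.update l, false, ins) := by
  induction l generalizing d with
  | nil => rfl
  | cons kv t ih =>
    simp only [List.map_cons, List.mem_cons, not_or] at h
    have hstep : pvStepA marker_key marker_desc new_entries (d, false, ins) kv
        = (d.insert kv.1 kv.2, false, ins) := by
      simp [pvStepA, Ne.symm h.1]
    rw [List.foldl_cons, hstep, ih _ h.2]
    simp [PySem.Dict.update]

-- phase lemma: over a segment without the marker key, starting in-block and not yet inserted
theorem pvFoldA_block (marker_key marker_desc : String) (new_entries : List (String × String))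
    (l : List (String × String)) (d : PySem.Dict String String)
    (h : marker_key ∉ l.map Prod.fst) :
    l.foldl (pvStepA marker_key marker_desc new_entries) (d, true, false)
      = (let f := l.findIdx pvIsBlock
         if f = l.length then (d.update l, true, false)
         else (((d.update (l.take f)).update new_entries).update (l.drop f), false, true)) := by
  induction l generalizing d with
  | nil => rfl
  | cons kv t ih =>
    simp only [List.map_cons, List.mem_cons, not_or] at h
    by_cases hb : pvIsBlock kv
    · have hstep : pvStepA marker_key marker_desc new_entries (d, true, false) kv
          = ((d.update new_entries).insert kv.1 kv.2, false, true) := by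
        simp [pvStepA, Ne.symm h.1, hb]
      rw [List.foldl_cons, hstep, pvFoldA_copy _ _ _ _ _ _ h.2]
      simp [List.findIdx_cons, hb, PySem.Dict.update]
    · have hstep : pvStepA marker_key marker_desc new_entries (d, true, false) kv
          = (d.insert kv.1 kv.2, true, false) := by
        simp [pvStepA, Ne.symm h.1, hb]
      rw [List.foldl_cons, hstep, ih _ h.2]
      simp only [List.findIdx_cons, hb, cond_false]
      by_cases hf : t.findIdx pvIsBlock = t.length
      · simp [hf, PySem.Dict.update]
      · have hne : ¬ (t.findIdx pvIsBlock + 1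
            = (kv :: t).length) := by simpa using hf
        simp [hf, PySem.Dict.update]

theorem insert_into_block_eq (raw : List (String × String)) (marker_key : String)
    (marker_desc : String) (new_entries : List (String × String))
    (hnd : (raw.map Prod.fst).Nodup) :
    insert_into_block raw marker_key marker_desc new_entries
      = insert_into_block_alt raw marker_key marker_desc new_entries := by
  by_cases hm : marker_key ∈ raw.map Prod.fst
  · -- marker present: split raw at the first (= only) occurrence of marker_key
    obtain ⟨i, hi⟩ : ∃ i, PySem.List.index? (raw.map Prod.fst) marker_key = some i := by
      cases hc : PySem.List.index? (raw.map Prod.fst) marker_key with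
      | none => exact absurd hm (List.idxOf?_eq_none_iff.mp hc)
      | some i => exact ⟨i, rfl⟩
    obtain ⟨preK, sufK, hsplit, hlen, hpre⟩ := (PySem.List.index?_eq_some_iff _ _ _).mp hi
    -- the corresponding split of raw
    have hiLt : i < raw.length := by
      have := congrArg List.length hsplit; simp at this; omega
    have htk : (raw.take i).map Prod.fst = preK := by
      have : (raw.map Prod.fst).take i = preK := by
        rw [hsplit, ← hlen]; simp
      simpa [List.map_take] using this
    have hdk : (raw.drop i).map Prod.fst = marker_key :: sufK := by
      have : (raw.map Prod.fst).drop i = marker_key :: sufK := by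
        rw [hsplit, ← hlen]; simp
      simpa [List.map_drop] using this
    obtain ⟨mv, rest, hrest⟩ : ∃ mv rest, raw.drop i = (marker_key, mv) :: rest := by
      cases hd : raw.drop i with
      | nil => rw [hd] at hdk; simp at hdk
      | cons p t =>
        rw [hd] at hdk; simp only [List.map_cons, List.cons.injEq] at hdk
        have hp : (marker_key, p.2) = p := by cases p; simp_all
        exact ⟨p.2, t, by rw [hp]⟩
    have hraw : raw = raw.take i ++ (marker_key, mv) :: rest := by
      rw [← hrest]; simp
    have hrestK : (rest.map Prod.fst) = sufK := by
      rw [hrest] at hdk; simpa using hdk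
    -- marker key absent from both sides of the split (Nodup)
    have hmkPre : marker_key ∉ (raw.take i).map Prod.fst := by rw [htk]; exact hpre
    have hmkRest : marker_key ∉ rest.map Prod.fst := by
      have h4 : (marker_key :: sufK).Nodup :=
        (hsplit ▸ hnd).sublist (List.sublist_append_right _ _)
      rw [hrestK]; exact (List.nodup_cons.mp h4).1
    -- evaluate A
    have hdrop1 : raw.drop (i + 1) = rest := by
      have h2 : raw = (raw.take i ++ [(marker_key, mv)]) ++ rest := by
        simpa [List.append_assoc] using hraw
      have h3 : (raw.take i ++ [(marker_key, mv)]).length = i + 1 := by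
        simp [List.length_take, Nat.min_eq_left hiLt.le]
      rw [h2, List.drop_left' h3]
    unfold insert_into_block insert_into_block_alt
    simp only [if_neg (not_not_intro hm), hi]
    conv_lhs => rw [hraw]
    rw [List.foldl_append, pvFoldA_copy _ _ _ _ _ _ hmkPre, List.foldl_cons]
    have hstep : pvStepA marker_key marker_desc new_entries
        ((PySem.Dict.empty.update (raw.take i)), false, false) (marker_key, mv)
        = ((PySem.Dict.empty.update (raw.take i)).insert marker_key marker_desc, true, false) := by
      simp [pvStepA]
    rw [hstep, pvFoldA_block _ _ _ _ _ hmkRest]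
    rw [hdrop1]
    have hjdrop : raw.drop ((i + 1) + List.findIdx pvIsBlock rest)
        = rest.drop (List.findIdx pvIsBlock rest) := by
      rw [← hdrop1, List.drop_drop]
    simp only [Nat.add_sub_cancel_left, hjdrop]
    by_cases hend : List.findIdx pvIsBlock rest = rest.length
    · simp [hend, PySem.Dict.ofList, PySem.Dict.update, List.foldl_append,
        List.take_length, List.drop_length]
    · simp [hend, PySem.Dict.ofList, PySem.Dict.update, List.foldl_append]
  · -- marker absent
    unfold insert_into_block insert_into_block_alt
    have hidx : PySem.List.index? (raw.map Prod.fst) marker_key = none :=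
      List.idxOf?_eq_none_iff.mpr hm
    simp only [if_pos hm, hidx]
    simp [PySem.Dict.ofList, PySem.Dict.update, List.foldl_append]

-- ===== VERDICT (by name: the statement is the Claim_ definition above) =====
theorem insert_into_block_spec : Claim_equal_insert_into_block := by
  intro raw marker_key marker_desc new_entries _ hpre
  exact insert_into_block_eq raw marker_key marker_desc new_entries hpre
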